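-- pv_equiv track=rewrite | github.com/junha6316/Algorithm | 0702_2NTiling_2.py | solution
-- ===== SOURCE A (Python) =====
-- def solution(N):
--     memo=[1,3]
--     smemo =[]
--     if N==1:
--         return 1
--     elif N==2:
--         return 3
--
--     for i in range(2,N):
--         if (i+1) % 2 ==1:
--             memo.append(2*memo[i-1]-1)
--         else:
--             memo.append(2 * memo[i - 1] + 1)
--
--     return memo[-1]
-- ===== SOURCE B (Python) =====
-- def solution(N):
--     # Closed form of the recurrence: a(n) = (2**(n+1) + (-1)**n) / 3
--     # (Python's ** uses fast exponentiation, so this is O(log N) multiplications.)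
--     return (2 ** (N + 1) + (-1) ** N) // 3
-- ===== Notes on version B (the rewrite author's own statement) =====
-- stated objective: faster
-- what changed: Replaced the O(N) iterative recurrence loop with the solved closed form a(N) = (2^(N+1) + (-1)^N)/3 computed with fast exponentiation.
-- intended difference: For N = 0 A returns the leftover last element of its seed memo (the empty loop never touches it), while B returns the closed-form value, the count of tilings of an empty board, which is the intended value. — e.g. on solution(0): A returns 3, B returns 1
-- outside the precondition, e.g. on solution(-1): A returns 3, B returns 0.0
import Mathlib
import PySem

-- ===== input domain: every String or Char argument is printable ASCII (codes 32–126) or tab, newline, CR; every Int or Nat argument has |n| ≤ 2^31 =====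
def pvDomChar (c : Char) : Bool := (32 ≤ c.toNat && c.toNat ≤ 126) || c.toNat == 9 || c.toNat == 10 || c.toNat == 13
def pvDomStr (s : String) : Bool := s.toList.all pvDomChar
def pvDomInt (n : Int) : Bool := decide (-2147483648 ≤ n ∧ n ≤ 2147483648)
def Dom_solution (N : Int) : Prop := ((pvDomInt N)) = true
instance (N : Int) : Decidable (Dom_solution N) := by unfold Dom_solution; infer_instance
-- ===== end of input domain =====

-- B replaces A's O(N) recurrence loop by the solved closed form (2^(N+1) + (-1)^N)/3 (fast exponentiation).

-- ===== PORT A =====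
-- one loop iteration: memo.append(2*memo[i-1] - 1) or memo.append(2*memo[i-1] + 1)
def solStep (memo : List Int) (i : Int) : List Int :=
  if PySem.Int.mod (i + 1) 2 == 1 then
    memo ++ [2 * PySem.List.pyGetD memo (i - 1) 0 - 1]
  else
    memo ++ [2 * PySem.List.pyGetD memo (i - 1) 0 + 1]

def solution (N : Int) : Int :=
  let memo : List Int := [1, 3]
  if N == 1 then 1
  else if N == 2 then 3
  else
    let memo := (PySem.List.pyRange 2 N 1).foldl solStep memo
    PySem.List.pyGetD memo (-1) 0    -- memo[-1]; memo is never empty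

-- ===== PORT B =====
def solution_alt (N : Int) : Int :=
  PySem.Int.floordiv (2 ^ (N + 1).toNat + (-1) ^ N.toNat) 3

-- ===== PRECONDITION & SPEC =====
-- Pre_ excludes negative N: there A's empty loop returns the leftover seed value, while B's
-- closed form leaves the int type (Python returns a float for a negative exponent).
def Pre_solution (N : Int) : Prop := 0 ≤ N
instance (N : Int) : Decidable (Pre_solution N) := by unfold Pre_solution; infer_instance
def pvWitness_solution : Int := 5

-- For N = 0 A returns the leftover last element of its seed memo (the empty loop never touches
-- it), while B returns the closed-form value, the count of tilings of an empty board, which is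
-- the intended value.
def D_solution (N : Int) : Prop := N = 0
instance (N : Int) : Decidable (D_solution N) := by unfold D_solution; infer_instance

def Spec_solution (N : Int) (out : Int) : Prop := ¬ D_solution N → out = solution_alt N
instance (N : Int) (out : Int) : Decidable (Spec_solution N out) := by unfold Spec_solution; infer_instance

def pvDiffWitness_solution : Int := 0
def pvDiffWitnessOut_solution : Int × Int := (3, 1)

-- ===== CLAIM (what is proved, stated in full; the proofs are below) =====
def Claim_unchanged_solution : Prop := ∀ (N : Int), Dom_solution N → Pre_solution N → Spec_solution N (solution N)
def Claim_changed_solution : Prop := Dom_solution (pvDiffWitness_solution) ∧ Pre_solution (pvDiffWitness_solution) ∧ D_solution (pvDiffWitness_solution) ∧ solution (pvDiffWitness_solution) = pvDiffWitnessOut_solution.1 ∧ solution_alt (pvDiffWitness_solution) = pvDiffWitnessOut_solution.2 ∧ pvDiffWitnessOut_solution.1 ≠ pvDiffWitnessOut_solution.2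
def Claim_exact_solution : Prop := ∀ (N : Int), Dom_solution N → Pre_solution N → D_solution N → solution N ≠ solution_alt N

-- ===== LEMMAS AND PROOFS =====
-- the recurrence A's loop computes: g k = memo[k]
def g : Nat → Int
  | 0 => 1
  | 1 => 3
  | (k+2) => if (k + 3) % 2 == 1 then 2 * g (k+1) - 1 else 2 * g (k+1) + 1

-- solved form of the recurrence
lemma threeG : ∀ k : Nat, 3 * g k = 2 ^ (k + 2) + (-1 : Int) ^ (k + 1) := by
  intro k
  induction k using Nat.strong_induction_on with
  | _ k ih =>
    match k with
    | 0 => decide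
    | 1 => decide
    | (k+2) =>
      have h := ih (k+1) (by omega)
      rcases Nat.even_or_odd k with he | ho
      · have h2 : (-1 : Int) ^ (k + 2) = 1 := (he.add even_two).neg_one_pow
        obtain ⟨r, hr⟩ := he
        have hm : (k + 3) % 2 = 1 := by omega
        have h3 : (-1 : Int) ^ (k + 2 + 1) = -1 := by
          rw [pow_succ, h2]; ring
        simp only [g, hm, beq_self_eq_true, if_true, h3]
        have : (2:Int) ^ (k + 2 + 2) = 2 * 2 ^ (k + 1 + 2) := by ring
        rw [this]; rw [h2] at h; omega
      · have h2 : (-1 : Int) ^ (k + 2) = -1 := (ho.add_even even_two).neg_one_pow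
        obtain ⟨r, hr⟩ := ho
        have hm : (k + 3) % 2 = 0 := by omega
        have h3 : (-1 : Int) ^ (k + 2 + 1) = 1 := by
          rw [pow_succ, h2]; ring
        simp only [g, hm, h3]
        norm_num
        have : (2:Int) ^ (k + 2 + 2) = 2 * 2 ^ (k + 1 + 2) := by ring
        rw [this]; rw [h2] at h; omega

-- A's loop builds exactly [g 0, …, g (n-1)]
lemma loopEq : ∀ n : Nat, 2 ≤ n →
    (PySem.List.pyRange 2 (n : Int) 1).foldl solStep [1, 3] = (List.range n).map g := by
  intro n hn
  induction n, hn using Nat.le_induction with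
  | base => decide
  | succ n hn ih =>
    have hsplit : PySem.List.pyRange 2 ((n : Int) + 1) 1
        = PySem.List.pyRange 2 (n : Int) 1 ++ [(n : Int)] := by
      exact PySem.List.pyRange_one_succ_right (by exact_mod_cast hn)
    push_cast
    rw [hsplit, List.foldl_append, ih]
    simp only [List.foldl]
    have hidx : ((n : Int) - 1) = ((n - 1 : Nat) : Int) := by omega
    have hget : PySem.List.pyGetD ((List.range n).map g) ((n : Int) - 1) 0 = g (n - 1) := by
      rw [hidx, PySem.List.pyGetD_natCast]
      rw [List.getD_eq_getElem?_getD]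
      simp [List.getElem?_map, List.getElem?_range (show n - 1 < n by omega)]
    have hmod : PySem.Int.mod ((n : Int) + 1) 2 = (((n + 1) % 2 : Nat) : Int) := by
      have : ((n : Int) + 1) = ((n + 1 : Nat) : Int) := by push_cast; ring
      rw [this]; exact_mod_cast PySem.Int.mod_natCast (n+1) 2
    obtain ⟨k, rfl⟩ : ∃ k, n = k + 2 := ⟨n - 2, by omega⟩
    have hrange : List.range (k + 2 + 1) = List.range (k + 2) ++ [k + 2] := List.range_succ
    rw [hrange, List.map_append]
    simp only [solStep, hget, hmod, List.map]
    have hg : g (k + 2) = if (k + 3) % 2 == 1 then 2 * g (k+1) - 1 else 2 * g (k+1) + 1 := rfl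
    by_cases hp : (k + 2 + 1) % 2 = 1
    · have : ((((k + 2 + 1) % 2 : Nat) : Int) == 1) = true := by simp [hp]
      rw [this]
      simp only [if_true, hg, show k + 2 - 1 = k + 1 from rfl]
      have : ((k + 3) % 2 == 1) = true := by simp; omega
      rw [this]; simp
    · have : ((((k + 2 + 1) % 2 : Nat) : Int) == 1) = false := by
        simp; omega
      rw [this]
      simp only [if_false, Bool.false_eq_true, hg, show k + 2 - 1 = k + 1 from rfl]
      have : ((k + 3) % 2 == 1) = false := by simp; omega
      rw [this]; simp

-- B at ↑n (n ≥ 1) is g (n - 1)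
lemma alt_eq_g (n : Nat) (hn : 1 ≤ n) : solution_alt (n : Int) = g (n - 1) := by
  unfold solution_alt
  have h1 : ((n : Int) + 1).toNat = n + 1 := by omega
  have h2 : (n : Int).toNat = n := by omega
  rw [h1, h2]
  have h3 : (2 : Int) ^ (n + 1) + (-1) ^ n = 3 * g (n - 1) := by
    have := threeG (n - 1)
    have e1 : n - 1 + 2 = n + 1 := by omega
    have e2 : n - 1 + 1 = n := by omega
    rw [e1, e2] at this; omega
  rw [h3, PySem.Int.floordiv_eq_ediv_of_pos (by norm_num)]
  exact Int.mul_ediv_cancel_left _ (by norm_num)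

-- A at ↑n (n ≥ 3) is g (n - 1)
lemma sol_eq_g (n : Nat) (hn : 3 ≤ n) : solution (n : Int) = g (n - 1) := by
  unfold solution
  have h1 : ((n : Int) == 1) = false := by simp; omega
  have h2 : ((n : Int) == 2) = false := by simp; omega
  rw [h1, h2]
  simp only [Bool.false_eq_true, if_false]
  rw [loopEq n (by omega)]
  have hne : (List.range n).map g ≠ [] := by
    simp [List.range_eq_nil]; omega
  rw [PySem.List.pyGetD_neg_one _ 0 hne]
  rw [List.getLast_eq_getElem]
  simp only [List.length_map, List.length_range]
  rw [List.getElem_map]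
  simp

-- ===== VERDICT (by name: the statement is the Claim_ definition above) =====
theorem solution_spec : Claim_unchanged_solution := by
  intro N _ hpre hd
  unfold Pre_solution at hpre
  unfold D_solution at hd
  obtain ⟨n, rfl⟩ : ∃ n : Nat, N = (n : Int) := ⟨N.toNat, by omega⟩
  have hn1 : 1 ≤ n := by
    rcases Nat.eq_zero_or_pos n with h | h
    · exfalso; apply hd; simp [h]
    · exact h
  rcases Nat.lt_or_ge n 3 with h3 | h3
  · interval_cases n
    · norm_cast
    · norm_cast
  · rw [sol_eq_g n h3, alt_eq_g n (by omega)]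

theorem solution_changed : Claim_changed_solution := by
  unfold Claim_changed_solution; decide

theorem solution_tight : Claim_exact_solution := by
  intro N _ _ hd
  unfold D_solution at hd
  subst hd; decide
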